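-- pv_equiv track=rewrite | github.com/YerkinGulnur/PP_2 | lab3/fuctions1.py | spy_game
-- ===== SOURCE A (Python) =====
-- def spy_game(nums):
--     for i in range(0,len(nums)):
--         if nums[i]==0:
--             for x in range(i+1,len(nums)):
--                 if nums[x]==0:
--                     for y in range(x+1,len(nums)):
--                         if nums[y]==7:
--                             return True
--                 else:
--                     return False
-- ===== SOURCE B (Python) =====
-- def spy_game(nums):
--     # Scan once: once the zeros start, the first non-zero element decides the
--     # game (at least two zeros must have accumulated and a 7 must still be
--     # ahead).  If the zeros never start or never end, there is no verdict.
--     zeros = 0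
--     for j, n in enumerate(nums):
--         if n == 0:
--             zeros += 1
--         elif zeros > 0:
--             return zeros >= 2 and 7 in nums[j:]
-- ===== Notes on version B (the rewrite author's own statement) =====
-- stated objective: simpler
-- what changed: B replaces A's triple nested index loops by one left-to-right pass that counts the run of zeros and decides the game at the first non-zero after it (zeros >= 2 and a 7 still ahead), falling through with no verdict when the zeros never start or never end; worst-case O(n) vs A's O(n^2), but random inputs rarely trigger A's quadratic case so no speed is claimed.
import Mathlib
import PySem

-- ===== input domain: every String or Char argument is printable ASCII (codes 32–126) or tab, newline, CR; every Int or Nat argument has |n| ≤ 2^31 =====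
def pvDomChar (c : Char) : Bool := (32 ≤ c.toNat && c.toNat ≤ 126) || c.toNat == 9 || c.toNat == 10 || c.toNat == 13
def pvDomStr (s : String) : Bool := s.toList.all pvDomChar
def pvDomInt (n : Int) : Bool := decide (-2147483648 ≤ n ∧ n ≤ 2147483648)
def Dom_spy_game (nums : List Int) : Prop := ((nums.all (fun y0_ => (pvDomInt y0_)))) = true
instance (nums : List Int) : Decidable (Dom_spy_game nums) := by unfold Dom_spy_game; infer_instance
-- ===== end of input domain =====

-- B replaces A's triple nested scans by a single pass that counts the zero run and decides at its
-- first interruption (objective: simpler; no speed claim).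
-- ===== PORT A =====
-- inner 'for y in range(x+1,len)': scan the suffix after x for a 7; some true = 'return True', none = fall through
def spyLoopY (t : List Int) : Option Bool :=
  match t with
  | [] => none
  | v :: t => if v == 7 then some true else spyLoopY t

-- middle 'for x in range(i+1,len)': some b = early return, none = loop fell through
def spyLoopX (t : List Int) : Option Bool :=
  match t with
  | [] => none
  | v :: t =>
      if v == 0 then
        match spyLoopY t with
        | some b => some b
        | none => spyLoopX t
      else some false

-- outer 'for i in range(0,len)'
def spyLoopI (t : List Int) : Option Bool :=
  match t with
  | [] => none
  | v :: t =>
      if v == 0 then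
        match spyLoopX t with
        | some b => some b
        | none => spyLoopI t
      else spyLoopI t

def spy_game (nums : List Int) : Option Bool := spyLoopI nums

-- ===== PORT B =====
-- Source B's single 'for j, n in enumerate(nums)' loop; the suffix nums[j:] of Source B is exactly the
-- current remaining list n :: t, so the loop carries only the remaining list and the zero count
def spyAltGo (l : List Int) (zeros : Nat) : Option Bool :=
  match l with
  | [] => none
  | n :: t =>
      if n == 0 then spyAltGo t (zeros + 1)
      else if zeros > 0 then some (decide (2 ≤ zeros) && (n :: t).contains 7)
      else spyAltGo t zeros

def spy_game_alt (nums : List Int) : Option Bool := spyAltGo nums 0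

-- ===== PRECONDITION & SPEC =====
def Spec_spy_game (nums : List Int) (out : Option Bool) : Prop := out = spy_game_alt nums
instance (nums : List Int) (out : Option Bool) : Decidable (Spec_spy_game nums out) := by
  unfold Spec_spy_game; infer_instance

-- ===== CLAIM (what is proved, stated in full; the proofs are below) =====
def Claim_equal_spy_game : Prop := ∀ (nums : List Int), Dom_spy_game nums → Spec_spy_game nums (spy_game nums)

-- ===== LEMMAS AND PROOFS =====
theorem spyLoopY_eq (t : List Int) :
    spyLoopY t = if t.contains 7 then some true else none := by
  induction t with
  | nil => simp [spyLoopY]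
  | cons v t ih =>
      rw [spyLoopY, ih]
      by_cases h : v = 7
      · simp [h]
      · have h' : ¬ (7 : Int) = v := fun e => h e.symm
        simp [h, h']

theorem spyLoopX_eq (t : List Int) :
    spyLoopX t = if t.all (fun v => v == 0) then none
                 else some ((t.headD 0 == 0) && (t.tail).contains 7) := by
  induction t with
  | nil => simp [spyLoopX]
  | cons v t ih =>
      rw [spyLoopX]
      by_cases h : v = 0
      · subst h
        rw [spyLoopY_eq, ih]
        by_cases h7 : (7 : Int) ∈ t
        · have hne : (t.all fun v => v == 0) = false := by
            simp only [List.all_eq_false]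
            exact ⟨7, h7, by decide⟩
          simp [h7, hne]
        · have h7t : (7 : Int) ∉ t.tail := fun hm => h7 (List.mem_of_mem_tail hm)
          by_cases hall : (t.all fun v => v == 0) = true
          · simp [h7, hall]
          · simp [h7, hall, h7t]
      · simp [h]

theorem spyLoopI_allzero (t : List Int) (h : t.all (fun v => v == 0) = true) :
    spyLoopI t = none := by
  induction t with
  | nil => rfl
  | cons v t ih =>
      simp only [List.all_cons, Bool.and_eq_true, beq_iff_eq] at h
      obtain ⟨hv, ht⟩ := h
      subst hv
      rw [spyLoopI, spyLoopX_eq, if_pos ht]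
      simp [ih ht]

-- dropping leading zeros does not change whether a 7 occurs
theorem contains_dropWhile_zero (r : List Int) :
    ((r.dropWhile (fun v => v == 0)).contains 7) = r.contains 7 := by
  induction r with
  | nil => rfl
  | cons v r ih =>
      by_cases h : v = 0
      · subst h
        simp only [List.dropWhile, beq_self_eq_true, ih]
        simp
      · have hb : (v == (0 : Int)) = false := by simpa using h
        simp [List.dropWhile, hb]

-- B's loop after the zeros have started (zeros ≥ 1), in closed form
theorem spyAltGo_pos (t : List Int) (z : Nat) (hz : 1 ≤ z) :
    spyAltGo t z =
      (if t.all (fun v => v == 0) then none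
       else some ((decide (2 ≤ z) || t.headD 1 == 0) &&
                  ((t.dropWhile (fun v => v == 0)).contains 7))) := by
  induction t generalizing z with
  | nil => simp [spyAltGo]
  | cons n t ih =>
      rw [spyAltGo]
      by_cases h : n = 0
      · subst h
        rw [ih (z + 1) (by omega)]
        have h2 : (2 ≤ z + 1) := by omega
        by_cases hall : t.all (fun v => v == 0)
        · simp [hall]
        · simp [hall, h2, List.dropWhile]
      · have hb : (n == (0 : Int)) = false := by simpa using h
        have hd : (n :: t).dropWhile (fun v => v == 0) = n :: t := by
          simp [List.dropWhile, hb]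
        have hne : ((n :: t).all fun v => v == 0) = false := by
          simp [List.all_cons, hb]
        rw [hne]
        simp only [hb, Bool.false_eq_true, if_false, hd]
        have hzpos : (0 < z) := hz
        simp [hzpos, hb, List.headD]

-- A = B, by induction on the list (both skip the prefix before the first 0 identically)
theorem spyLoopI_eq_alt (l : List Int) : spyLoopI l = spyAltGo l 0 := by
  induction l with
  | nil => rfl
  | cons v t ih =>
      rw [spyLoopI, spyAltGo]
      by_cases h : v = 0
      · subst h
        rw [spyLoopX_eq, spyAltGo_pos t 1 (by omega)]
        by_cases hall : t.all (fun v => v == 0)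
        · simp [hall, spyLoopI_allzero t hall]
        · simp only [hall, Bool.false_eq_true, if_false, beq_self_eq_true, if_true]
          cases t with
          | nil => exact absurd (by simp) hall
          | cons a r =>
              by_cases ha : a = 0
              · subst ha
                simp only [List.headD, List.tail_cons, List.dropWhile, beq_self_eq_true]
                rw [contains_dropWhile_zero]
                simp
              · have hb : (a == (0 : Int)) = false := by simpa using ha
                simp [List.headD, List.dropWhile, hb]
      · simp only [beq_iff_eq, h, if_false]
        exact ih

-- ===== VERDICT (by name: the statement is the Claim_ definition above) =====
theorem spy_game_spec : Claim_equal_spy_game := by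
  intro nums _
  unfold Spec_spy_game spy_game spy_game_alt
  exact spyLoopI_eq_alt nums
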